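-- pv_equiv track=rewrite | github.com/dwchoo/q-seq-maker | encoder_decoder/seq_encoder_decoder.py | __make_slice_position
-- ===== SOURCE A (Python) =====
-- def __make_slice_position(slice_length_list):
--     '''
--     input: slice length
--         [7,7,6]
--     output: slice position
--         [(0,7),(7,14),(14,20)]
--     '''
--     slice_position = []
--     previous_position = 0
--     next_position = 0
--     for _length in slice_length_list:
--         _start = previous_position
--         _end = _start + _length
--         slice_position.append((_start,_end))
--         previous_position = _end
--     return slice_position
-- ===== SOURCE B (Python) =====
-- from itertools import accumulate
--
-- def __make_slice_position(slice_length_list):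
--     offsets = list(accumulate(slice_length_list, initial=0))
--     return list(zip(offsets, offsets[1:]))
-- ===== Notes on version B (the rewrite author's own statement) =====
-- stated objective: idiomatic
-- what changed: Replaces the running-offset loop that appends (start,end) pairs by a two-phase build: an itertools.accumulate prefix-offset table followed by zipping consecutive offsets.
import Mathlib
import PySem

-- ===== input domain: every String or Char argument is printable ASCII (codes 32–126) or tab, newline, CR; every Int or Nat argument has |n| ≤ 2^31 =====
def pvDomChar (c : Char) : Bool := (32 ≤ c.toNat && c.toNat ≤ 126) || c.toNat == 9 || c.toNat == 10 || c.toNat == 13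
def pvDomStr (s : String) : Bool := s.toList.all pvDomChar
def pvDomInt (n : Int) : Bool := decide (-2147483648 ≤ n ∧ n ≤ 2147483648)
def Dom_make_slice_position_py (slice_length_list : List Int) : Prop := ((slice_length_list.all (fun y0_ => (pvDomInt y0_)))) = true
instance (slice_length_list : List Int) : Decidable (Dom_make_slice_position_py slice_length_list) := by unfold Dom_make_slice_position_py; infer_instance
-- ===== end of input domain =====

-- B replaces A's running-offset append loop with a prefix-offset table (accumulate) zipped with its tail; idiomatic, same O(n) cost.


-- ===== PORT A =====
-- loop: for _length in slice_length_list, carrying (slice_position, previous_position)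
def make_slice_position_py (slice_length_list : List Int) : List (Int × Int) :=
  (slice_length_list.foldl
    (fun (st : List (Int × Int) × Int) _length =>
      let _start := st.2
      let _end := _start + _length
      (st.1 ++ [(_start, _end)], _end))
    ([], 0)).1

-- ===== PORT B =====
-- itertools.accumulate(xs, initial=0): prefix sums starting with 0
def pvAccum (acc : Int) : List Int → List Int
  | [] => [acc]
  | x :: xs => acc :: pvAccum (acc + x) xs

def make_slice_position_py_alt (slice_length_list : List Int) : List (Int × Int) :=
  let offsets := pvAccum 0 slice_length_list
  offsets.zip offsets.tail

-- ===== PRECONDITION & SPEC =====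
def Spec_make_slice_position_py (slice_length_list : List Int) (out : List (Int × Int)) : Prop := out = make_slice_position_py_alt slice_length_list
instance (slice_length_list : List Int) (out : List (Int × Int)) : Decidable (Spec_make_slice_position_py slice_length_list out) := by unfold Spec_make_slice_position_py; infer_instance

-- ===== CLAIM (what is proved, stated in full; the proofs are below) =====
def Claim_equal_make_slice_position_py : Prop := ∀ (slice_length_list : List Int), Dom_make_slice_position_py slice_length_list → Spec_make_slice_position_py slice_length_list (make_slice_position_py slice_length_list)

-- ===== LEMMAS AND PROOFS =====

theorem pvAccum_zip_cons (a x : Int) (xs : List Int) :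
    (pvAccum a (x :: xs)).zip (pvAccum a (x :: xs)).tail
    = (a, a + x) :: (pvAccum (a + x) xs).zip (pvAccum (a + x) xs).tail := by
  cases xs <;> simp [pvAccum]

theorem pv_fold_eq_zip (xs : List Int) (acc : List (Int × Int)) (prev : Int) :
    (xs.foldl
      (fun (st : List (Int × Int) × Int) _length =>
        let _start := st.2
        let _end := _start + _length
        (st.1 ++ [(_start, _end)], _end))
      (acc, prev)).1
    = acc ++ (pvAccum prev xs).zip (pvAccum prev xs).tail := by
  induction xs generalizing acc prev with
  | nil => simp [pvAccum]
  | cons x xs ih =>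
      rw [pvAccum_zip_cons]
      simp only [List.foldl]
      rw [ih]
      simp

-- ===== VERDICT (by name: the statement is the Claim_ definition above) =====
theorem make_slice_position_py_spec : Claim_equal_make_slice_position_py := by
  intro xs _
  unfold Spec_make_slice_position_py make_slice_position_py make_slice_position_py_alt
  simpa using pv_fold_eq_zip xs [] 0
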